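-- pv_equiv track=rewrite | github.com/V33RU/hardencheck | hardencheck/analyzers/pqc_readiness.py | _overall_readiness
-- ===== SOURCE A (Python) =====
-- def _overall_readiness(findings):
--     """Determine overall PQC readiness across all binaries."""
--     if not findings:
--         return "NOT_READY"
--     if any(f["readiness"] == "CRITICAL" for f in findings):
--         return "CRITICAL"
--     readiness_set = {f["readiness"] for f in findings}
--     if readiness_set == {"READY"}:
--         return "READY"
--     if "READY" in readiness_set or "HYBRID" in readiness_set:
--         return "HYBRID"
--     return "NOT_READY"
-- ===== SOURCE B (Python) =====
-- def _overall_readiness(findings):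
--     """Determine overall PQC readiness across all binaries (single pass)."""
--     if not findings:
--         return "NOT_READY"
--     has_ready = False
--     has_hybrid = False
--     has_non_ready = False
--     for f in findings:
--         r = f["readiness"]
--         if r == "CRITICAL":
--             return "CRITICAL"
--         has_ready = has_ready or r == "READY"
--         has_hybrid = has_hybrid or r == "HYBRID"
--         has_non_ready = has_non_ready or r != "READY"
--     if has_ready and not has_non_ready:
--         return "READY"
--     if has_ready or has_hybrid:
--         return "HYBRID"
--     return "NOT_READY"
-- ===== Notes on version B (the rewrite author's own statement) =====
-- stated objective: simpler
-- what changed: Replaces the three separate passes (any()-scan, set comprehension, set comparisons) with one pass maintaining three booleans that early-returns on CRITICAL and decides the result from the flags.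
import Mathlib
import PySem

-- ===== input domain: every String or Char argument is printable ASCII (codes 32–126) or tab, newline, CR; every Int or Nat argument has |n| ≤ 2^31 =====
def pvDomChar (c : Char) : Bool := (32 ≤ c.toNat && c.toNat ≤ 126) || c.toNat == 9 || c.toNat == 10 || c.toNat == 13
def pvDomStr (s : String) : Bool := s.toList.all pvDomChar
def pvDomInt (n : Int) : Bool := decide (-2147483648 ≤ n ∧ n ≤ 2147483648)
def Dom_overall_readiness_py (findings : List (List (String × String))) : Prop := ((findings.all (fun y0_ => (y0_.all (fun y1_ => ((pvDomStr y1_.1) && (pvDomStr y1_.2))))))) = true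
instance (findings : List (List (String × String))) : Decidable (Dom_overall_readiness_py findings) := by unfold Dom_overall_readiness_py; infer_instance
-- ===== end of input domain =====

-- B replaces A's three passes (any(), a set comprehension, set comparisons) with one
-- flag-accumulating pass that early-returns on CRITICAL; return values are identical.

-- ===== PORT A =====
-- f["readiness"] : total stand-in returns "" where the key is missing; Pre_ excludes
-- exactly the inputs where the Python lookup raises KeyError.
def pvRd (f : List (String × String)) : String :=
  ((PySem.Dict.mk f).get? "readiness").getD ""

def overall_readiness_py (findings : List (List (String × String))) : String :=
  if findings = [] then "NOT_READY"
  else if findings.any (fun f => pvRd f == "CRITICAL") then "CRITICAL"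
  else
    let readinessSet : PySem.Set String := PySem.Set.ofList (findings.map pvRd)
    if PySem.Set.equal readinessSet ["READY"] then "READY"
    else if PySem.Set.contains readinessSet "READY" || PySem.Set.contains readinessSet "HYBRID" then "HYBRID"
    else "NOT_READY"

-- ===== PORT B =====
def pvAltLoop : List (List (String × String)) → Bool → Bool → Bool → String
  | [], hasReady, hasHybrid, hasNonReady =>
      if hasReady && !hasNonReady then "READY"
      else if hasReady || hasHybrid then "HYBRID"
      else "NOT_READY"
  | f :: rest, hasReady, hasHybrid, hasNonReady =>
      let r := pvRd f
      if r == "CRITICAL" then "CRITICAL"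
      else pvAltLoop rest (hasReady || r == "READY") (hasHybrid || r == "HYBRID")
             (hasNonReady || r != "READY")

def overall_readiness_py_alt (findings : List (List (String × String))) : String :=
  if findings = [] then "NOT_READY"
  else pvAltLoop findings false false false

-- ===== PRECONDITION & SPEC =====
-- Pre_ excludes exactly the inputs on which Python A raises KeyError: a finding without
-- a "readiness" key that the scan reaches (i.e. not preceded by a CRITICAL finding).
def Pre_overall_readiness_py (findings : List (List (String × String))) : Prop :=
  ∀ i : Fin findings.length, ((PySem.Dict.mk findings[i]).get? "readiness") = none →
    ∃ j : Fin findings.length, j.val < i.val ∧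
      (PySem.Dict.mk findings[j]).get? "readiness" = some "CRITICAL"
instance (findings : List (List (String × String))) : Decidable (Pre_overall_readiness_py findings) := by
  unfold Pre_overall_readiness_py; infer_instance

def pvWitness_overall_readiness_py : (List (List (String × String))) :=
  [[("readiness", "READY")], [("readiness", "HYBRID")]]

def Spec_overall_readiness_py (findings : List (List (String × String))) (out : String) : Prop := out = overall_readiness_py_alt findings
instance (findings : List (List (String × String))) (out : String) : Decidable (Spec_overall_readiness_py findings out) := by unfold Spec_overall_readiness_py; infer_instance

-- ===== CLAIM (what is proved, stated in full; the proofs are below) =====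
def Claim_equal_overall_readiness_py : Prop := ∀ (findings : List (List (String × String))), Dom_overall_readiness_py findings → Pre_overall_readiness_py findings → Spec_overall_readiness_py findings (overall_readiness_py findings)

-- ===== LEMMAS AND PROOFS =====

-- If some finding reads CRITICAL, the loop returns "CRITICAL" whatever the flags are.
theorem pvAltLoop_critical (l : List (List (String × String)))
    (h : l.any (fun f => pvRd f == "CRITICAL") = true) (hr hh hn : Bool) :
    pvAltLoop l hr hh hn = "CRITICAL" := by
  induction l generalizing hr hh hn with
  | nil => simp at h
  | cons f rest ih =>
    simp only [List.any_cons, Bool.or_eq_true] at h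
    cases hc : (pvRd f == "CRITICAL") with
    | true => simp [pvAltLoop, hc]
    | false =>
      have hrest : rest.any (fun f => pvRd f == "CRITICAL") = true := by
        rcases h with h | h
        · rw [hc] at h; exact absurd h (by simp)
        · exact h
      simp only [pvAltLoop, hc, Bool.false_eq_true, if_false]
      exact ih hrest _ _ _

-- If no finding reads CRITICAL, the loop computes the final flags pointwise.
theorem pvAltLoop_no_critical (l : List (List (String × String)))
    (h : l.any (fun f => pvRd f == "CRITICAL") = false) (hr hh hn : Bool) :
    pvAltLoop l hr hh hn =
      pvAltLoop [] (hr || l.any (fun f => pvRd f == "READY"))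
        (hh || l.any (fun f => pvRd f == "HYBRID"))
        (hn || l.any (fun f => pvRd f != "READY")) := by
  induction l generalizing hr hh hn with
  | nil => simp
  | cons f rest ih =>
    simp only [List.any_cons, Bool.or_eq_false_iff] at h
    have hstep : pvAltLoop (f :: rest) hr hh hn
        = pvAltLoop rest (hr || (pvRd f == "READY")) (hh || (pvRd f == "HYBRID"))
            (hn || (pvRd f != "READY")) := by
      simp only [pvAltLoop, h.1, Bool.false_eq_true, if_false]
    rw [hstep, ih h.2, List.any_cons, List.any_cons, List.any_cons,
      Bool.or_assoc, Bool.or_assoc, Bool.or_assoc]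

theorem overall_readiness_py_spec' (findings : List (List (String × String))) :
    overall_readiness_py findings = overall_readiness_py_alt findings := by
  by_cases he : findings = []
  · simp [overall_readiness_py, overall_readiness_py_alt, he]
  · by_cases hc : findings.any (fun f => pvRd f == "CRITICAL")
    · simp [overall_readiness_py, overall_readiness_py_alt, he, hc,
        pvAltLoop_critical _ hc]
    · rw [Bool.not_eq_true] at hc
      -- membership in ofList = any over the list
      have hmem : ∀ s : String,
          PySem.Set.contains (PySem.Set.ofList (findings.map pvRd)) s
            = findings.any (fun f => pvRd f == s) := by
        intro s
        apply Bool.eq_iff_iff.mpr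
        rw [PySem.Set.contains_iff, PySem.Set.mem_ofList, List.mem_map, List.any_eq_true]
        constructor
        · rintro ⟨f, hf, hfe⟩; exact ⟨f, hf, by simp [hfe]⟩
        · rintro ⟨f, hf, hfe⟩; exact ⟨f, hf, by simpa using hfe⟩
      -- Python set equality with {"READY"}
      have heq : PySem.Set.equal (PySem.Set.ofList (findings.map pvRd)) ["READY"]
          = (findings.any (fun f => pvRd f == "READY")
             && !findings.any (fun f => pvRd f != "READY")) := by
        by_cases hall : ∀ f ∈ findings, pvRd f = "READY"
        · have h1 : findings.any (fun f => pvRd f == "READY") = true := by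
            obtain ⟨f, hf⟩ := List.exists_mem_of_ne_nil _ he
            exact List.any_eq_true.2 ⟨f, hf, by simp [hall f hf]⟩
          have h2 : findings.any (fun f => pvRd f != "READY") = false := by
            simp only [List.any_eq_false]
            intro f hf; simp [hall f hf]
          rw [h1, h2]
          rw [(PySem.Set.equal_iff _ _).2]
          · rfl
          · intro x
            simp only [PySem.Set.mem_ofList, List.mem_map, List.mem_singleton]
            constructor
            · rintro ⟨f, hf, rfl⟩; exact hall f hf
            · rintro rfl
              obtain ⟨f, hf⟩ := List.exists_mem_of_ne_nil _ he
              exact ⟨f, hf, hall f hf⟩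
        · push Not at hall
          obtain ⟨f, hf, hfne⟩ := hall
          have h2 : findings.any (fun f => pvRd f != "READY") = true :=
            List.any_eq_true.2 ⟨f, hf, by simp [hfne]⟩
          have hfalse : PySem.Set.equal (PySem.Set.ofList (findings.map pvRd)) ["READY"]
              = false := by
            apply Bool.eq_false_iff.mpr
            intro htrue
            have hall' := (PySem.Set.equal_iff _ _).1 htrue
            have hx := (hall' (pvRd f)).1
              ((PySem.Set.mem_ofList _ _).2 (List.mem_map.2 ⟨f, hf, rfl⟩))
            simp at hx
            exact hfne hx
          simp [hfalse, h2]
      simp only [overall_readiness_py, overall_readiness_py_alt, he,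
        Bool.false_eq_true, if_false, hc]
      rw [pvAltLoop_no_critical _ hc, heq, hmem "READY", hmem "HYBRID"]
      simp only [pvAltLoop, Bool.false_or]

-- ===== VERDICT (by name: the statement is the Claim_ definition above) =====
theorem overall_readiness_py_spec : Claim_equal_overall_readiness_py := by
  intro findings _ _
  exact overall_readiness_py_spec' findings
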